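-- pv_equiv track=rewrite | github.com/AbinZorto/eeg-mlflow | eeg_analysis/src/utils/plot_data_loader.py | infer_fold_target_class
-- ===== SOURCE A (Python) =====
-- from typing import Any, Dict, Iterable, List, Optional, Sequence, Tuple
--
-- def infer_fold_target_class(patient_predictions: Sequence[Dict[str, Any]]) -> str:
--     labels = sorted({row.get("true_label") for row in patient_predictions if row.get("true_label") is not None})
--     labels = [label for label in labels if label in {0, 1}]
--     if not labels:
--         return "unknown"
--     if labels == [1]:
--         return "remission"
--     if labels == [0]:
--         return "non_remission"
--     return "mixed"
-- ===== SOURCE B (Python) =====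
-- def infer_fold_target_class(patient_predictions):
--     saw_zero = False
--     saw_one = False
--     for row in patient_predictions:
--         label = row.get("true_label")
--         if label is None:
--             continue
--         if label == 0:
--             saw_zero = True
--         if label == 1:
--             saw_one = True
--     if not saw_zero and not saw_one:
--         return "unknown"
--     if saw_one and not saw_zero:
--         return "remission"
--     if saw_zero and not saw_one:
--         return "non_remission"
--     return "mixed"
-- ===== Notes on version B (the rewrite author's own statement) =====
-- stated objective: simpler
-- what changed: Replaces A's set-comprehension + sort + filter + list-literal comparisons with a single pass maintaining two booleans (saw_zero/saw_one) and a flag-based classification, with no container, sort or filter.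
import Mathlib
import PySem

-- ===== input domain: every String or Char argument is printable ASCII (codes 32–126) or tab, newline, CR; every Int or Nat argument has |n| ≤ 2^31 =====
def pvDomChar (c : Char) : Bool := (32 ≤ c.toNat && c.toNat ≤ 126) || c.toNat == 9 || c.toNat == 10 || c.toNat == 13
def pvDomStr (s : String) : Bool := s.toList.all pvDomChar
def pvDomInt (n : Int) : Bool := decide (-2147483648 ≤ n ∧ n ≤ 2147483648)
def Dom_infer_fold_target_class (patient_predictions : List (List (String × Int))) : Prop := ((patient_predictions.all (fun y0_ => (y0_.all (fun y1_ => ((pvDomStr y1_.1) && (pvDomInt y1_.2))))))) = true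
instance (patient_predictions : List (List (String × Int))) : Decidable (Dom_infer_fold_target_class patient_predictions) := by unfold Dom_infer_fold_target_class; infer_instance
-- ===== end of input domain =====

-- B replaces A's set-build + sort + filter + list comparisons by a single pass over the rows
-- accumulating two booleans (saw_zero / saw_one) and classifying from the flags (simpler).

-- ===== PORT A =====
def infer_fold_target_class (patient_predictions : List (List (String × Int))) : String :=
  -- {row.get("true_label") for row in … if row.get("true_label") is not None}, then sorted(…)
  let labels :=
    PySem.List.sorted
      (PySem.Set.ofList (patient_predictions.filterMap (fun row => PySem.Dict.get? (PySem.Dict.mk row) "true_label")))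
      (fun x => x) false
  let labels := labels.filter (fun label => label == 0 || label == 1)
  if labels = [] then "unknown"
  else if labels = [1] then "remission"
  else if labels = [0] then "non_remission"
  else "mixed"

-- ===== PORT B =====
def infer_fold_target_class_alt (patient_predictions : List (List (String × Int))) : String :=
  let flags := patient_predictions.foldl
    (fun (ac : Bool × Bool) (row : List (String × Int)) =>
      match PySem.Dict.get? (PySem.Dict.mk row) "true_label" with
      | none => ac
      | some label => ((ac.1 || label == 0), (ac.2 || label == 1)))
    (false, false)
  if !flags.1 && !flags.2 then "unknown"
  else if flags.2 && !flags.1 then "remission"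
  else if flags.1 && !flags.2 then "non_remission"
  else "mixed"

-- ===== PRECONDITION & SPEC =====
def Spec_infer_fold_target_class (patient_predictions : List (List (String × Int))) (out : String) : Prop := out = infer_fold_target_class_alt patient_predictions
instance (patient_predictions : List (List (String × Int))) (out : String) : Decidable (Spec_infer_fold_target_class patient_predictions out) := by unfold Spec_infer_fold_target_class; infer_instance

-- ===== CLAIM (what is proved, stated in full; the proofs are below) =====
def Claim_equal_infer_fold_target_class : Prop := ∀ (patient_predictions : List (List (String × Int))), Dom_infer_fold_target_class patient_predictions → Spec_infer_fold_target_class patient_predictions (infer_fold_target_class patient_predictions)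

-- ===== LEMMAS AND PROOFS =====

-- the list of present true_labels
def pvVals (pps : List (List (String × Int))) : List Int :=
  pps.filterMap (fun row => PySem.Dict.get? (PySem.Dict.mk row) "true_label")

lemma pv_or_beq (b : Bool) (l c : Int) (P : Prop) [Decidable P] :
    (b || (l == c || decide P)) = (b || decide (c = l ∨ P)) := by
  by_cases h : l = c
  · simp [h]
  · rw [beq_eq_false_iff_ne.2 h, Bool.false_or]
    simp [Ne.symm h]

lemma pv_flags_eq (pps : List (List (String × Int))) (b0 b1 : Bool) :
    pps.foldl
      (fun (ac : Bool × Bool) (row : List (String × Int)) =>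
        match PySem.Dict.get? (PySem.Dict.mk row) "true_label" with
        | none => ac
        | some label => ((ac.1 || label == 0), (ac.2 || label == 1)))
      (b0, b1)
    = (b0 || decide ((0:Int) ∈ pvVals pps), b1 || decide ((1:Int) ∈ pvVals pps)) := by
  induction pps generalizing b0 b1 with
  | nil => simp [pvVals]
  | cons r t ih =>
      simp only [List.foldl_cons]
      cases h : PySem.Dict.get? (PySem.Dict.mk r) "true_label" with
      | none => simp [ih, pvVals, h]
      | some l =>
          simp only [ih, pvVals, List.filterMap_cons, h, List.mem_cons,
            Prod.mk.injEq]
          refine ⟨?_, ?_⟩ <;> · rw [Bool.or_assoc, pv_or_beq]; congr 1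

-- a strictly increasing list whose elements lie in {0,1} is determined by membership
lemma pv_filter01 (F : List Int) (hp : F.Pairwise (· < ·)) (hm : ∀ x ∈ F, x = 0 ∨ x = 1) :
    F = if (0:Int) ∈ F then (if (1:Int) ∈ F then [0, 1] else [0])
        else (if (1:Int) ∈ F then [1] else []) := by
  match F, hp, hm with
  | [], _, _ => simp
  | [a], _, hm =>
      rcases hm a (by simp) with h | h <;> subst h <;> simp
  | a :: b :: rest, hp, hm =>
      have hab : a < b := (List.pairwise_cons.1 hp).1 b (by simp)
      rcases hm a (by simp) with ha | ha <;> rcases hm b (by simp) with hb | hb <;>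
        subst ha <;> subst hb <;> try omega
      have hrest : rest = [] := by
        cases rest with
        | nil => rfl
        | cons c t =>
            have hbc : (1:Int) < c :=
              (List.pairwise_cons.1 (List.pairwise_cons.1 hp).2).1 c (by simp)
            rcases hm c (by simp) with hc | hc <;> omega
      subst hrest; simp

lemma pv_mem_filtered (pps : List (List (String × Int))) (x : Int) :
    x ∈ ((PySem.List.sorted (PySem.Set.ofList (pvVals pps)) (fun x => x) false).filter
          (fun label => label == 0 || label == 1))
      ↔ ((x = 0 ∨ x = 1) ∧ x ∈ pvVals pps) := by
  simp [List.mem_filter, PySem.List.mem_sorted, PySem.Set.mem_ofList, and_comm]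

-- ===== VERDICT (by name: the statement is the Claim_ definition above) =====
theorem infer_fold_target_class_spec : Claim_equal_infer_fold_target_class := by
  intro pps _
  unfold Spec_infer_fold_target_class infer_fold_target_class infer_fold_target_class_alt
  rw [pv_flags_eq pps false false]
  set F := ((PySem.List.sorted (PySem.Set.ofList (pvVals pps)) (fun x => x) false).filter
      (fun label => label == 0 || label == 1)) with hF
  have hp : F.Pairwise (· < ·) :=
    List.Pairwise.filter _ (PySem.List.sorted_ofList_pairwise_lt (pvVals pps))
  have hm : ∀ x ∈ F, x = 0 ∨ x = 1 := by
    intro x hx; exact ((pv_mem_filtered pps x).1 hx).1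
  have hchar := pv_filter01 F hp hm
  have h0 : ((0:Int) ∈ F) ↔ (0:Int) ∈ pvVals pps := by
    rw [hF, pv_mem_filtered]; simp
  have h1 : ((1:Int) ∈ F) ↔ (1:Int) ∈ pvVals pps := by
    rw [hF, pv_mem_filtered]; simp
  show (if F = [] then "unknown"
        else if F = [1] then "remission"
        else if F = [0] then "non_remission" else "mixed") = _
  by_cases c0 : (0:Int) ∈ pvVals pps <;> by_cases c1 : (1:Int) ∈ pvVals pps <;>
    · rw [hchar]
      simp [h0, h1, c0, c1]
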